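-- pv_equiv track=rewrite | github.com/dd-jero/CodeProblem | 프로그래머스/lv2/12973. 짝지어 제거하기/짝지어 제거하기.py | solution
-- ===== SOURCE A (Python) =====
-- def solution(s):
--
--     stack = []
--
--     for al in s:
--         stack.append(al)
--         if  len(stack) > 1:
--             if  stack[-1] ==  stack[-2]:
--                 del stack[-2:]
--
--     if stack:
--         return 0
--     else:
--         return 1
-- ===== SOURCE B (Python) =====
-- def solution(s):
--     # Fixpoint reduction: repeatedly delete the first adjacent equal pair
--     # until no adjacent equal pair remains; answer 1 iff nothing is left.
--     t = s
--     while True: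
--         for i in range(len(t) - 1):
--             if t[i] == t[i + 1]:
--                 t = t[:i] + t[i + 2:]
--                 break
--         else:
--             return 1 if t == "" else 0
-- ===== Notes on version B (the rewrite author's own statement) =====
-- stated objective: alternative
-- what changed: B computes the answer by repeated reduction to a fixpoint (scan for the first adjacent equal pair, delete it, restart, until no pair remains) instead of A's one-pass stack; correctness relies on confluence of pair removal.
import Mathlib
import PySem

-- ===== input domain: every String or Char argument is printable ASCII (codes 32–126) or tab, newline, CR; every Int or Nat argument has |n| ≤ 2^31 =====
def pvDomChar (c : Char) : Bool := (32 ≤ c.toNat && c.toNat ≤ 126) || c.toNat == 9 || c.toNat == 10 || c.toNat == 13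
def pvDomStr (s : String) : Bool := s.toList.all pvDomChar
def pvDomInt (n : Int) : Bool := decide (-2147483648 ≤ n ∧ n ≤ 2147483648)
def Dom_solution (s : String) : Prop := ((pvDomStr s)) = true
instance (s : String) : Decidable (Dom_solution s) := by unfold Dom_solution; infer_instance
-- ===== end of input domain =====

-- B replaces A's one-pass stack by repeated deletion of the first adjacent equal
-- pair until a fixpoint (no pair) remains; alternative decomposition, not faster.


-- ===== PORT A =====
-- stack.append(al); if len(stack) > 1 and stack[-1] == stack[-2]: del stack[-2:]
def aStep (st : List Char) (c : Char) : List Char :=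
  let st1 := st ++ [c]
  if 1 < st1.length then
    if PySem.List.pyGet? st1 (-1) = PySem.List.pyGet? st1 (-2) then
      PySem.List.slice st1 none (some (-2))      -- del stack[-2:] keeps stack[:-2]
    else st1
  else st1

def solution (s : String) : Int :=
  let stack := s.toList.foldl aStep []
  if stack ≠ [] then 0 else 1

-- ===== PORT B =====
-- the inner for-loop of Source B: scan left-to-right for the first i with t[i] == t[i+1];
-- some t' = t with that pair deleted (t[:i] + t[i+2:]), none = no adjacent equal pair
def removeFirstPair : List Char → Option (List Char)
  | a :: b :: r => if a = b then some r else (removeFirstPair (b :: r)).map (a :: ·)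
  | _ => none

theorem removeFirstPair_length : ∀ (t t' : List Char),
    removeFirstPair t = some t' → t'.length < t.length
  | [], _, h => by simp [removeFirstPair] at h
  | [_], _, h => by simp [removeFirstPair] at h
  | a :: b :: r, t', h => by
    by_cases hab : a = b
    · simp only [removeFirstPair, if_pos hab, Option.some.injEq] at h
      subst h; simp
    · simp only [removeFirstPair, if_neg hab, Option.map_eq_some_iff] at h
      obtain ⟨u, hu, rfl⟩ := h
      have := removeFirstPair_length (b :: r) u hu
      simp at this ⊢; omega

-- the outer while-loop of Source B: keep deleting until no pair is found
def reduceFix (t : List Char) : List Char :=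
  match h : removeFirstPair t with
  | some t' => reduceFix t'
  | none => t
termination_by t.length
decreasing_by exact removeFirstPair_length _ _ h

def solution_alt (s : String) : Int :=
  if reduceFix s.toList = [] then 1 else 0

-- ===== PRECONDITION & SPEC =====
def Spec_solution (s : String) (out : Int) : Prop := out = solution_alt s
instance (s : String) (out : Int) : Decidable (Spec_solution s out) := by unfold Spec_solution; infer_instance

-- ===== CLAIM (what is proved, stated in full; the proofs are below) =====
def Claim_equal_solution : Prop := ∀ (s : String), Dom_solution s → Spec_solution s (solution s)

-- ===== LEMMAS AND PROOFS =====

-- A's stack step with the stack kept in reversed order (top = head)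
def rstep (st : List Char) (c : Char) : List Char :=
  match st with
  | [] => [c]
  | b :: r => if c = b then r else c :: b :: r

theorem aStep_eq_rstep : ∀ (r : List Char) (c : Char),
    aStep r.reverse c = (rstep r c).reverse := by
  intro r c
  cases r with
  | nil => simp [aStep, rstep]
  | cons b rs =>
    have hlen : (rs.reverse ++ [b] ++ [c]).length = rs.length + 2 := by simp
    have hget2 : PySem.List.pyGet? (rs.reverse ++ [b] ++ [c]) (-2) = some b := by
      rw [PySem.List.pyGet?_neg_ofNat _ 2 (by omega) (by simp)]
      rw [hlen]
      have h2 : rs.length + 2 - 2 = rs.reverse.length := by simp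
      rw [h2, List.append_assoc, List.getElem?_append_right (le_refl _)]
      simp
    have hget1 : PySem.List.pyGet? (rs.reverse ++ [b] ++ [c]) (-1) = some c :=
      PySem.List.pyGet?_neg_one_append_singleton _ _
    simp only [aStep, List.reverse_cons]
    rw [if_pos (by simp), hget1, hget2]
    by_cases hcb : c = b
    · rw [if_pos (by rw [hcb])]
      rw [PySem.List.slice_to_neg_ofNat _ 2 (by omega), hlen]
      have h2 : rs.length + 2 - 2 = rs.reverse.length := by simp
      rw [h2, List.append_assoc, List.take_left]
      simp [rstep, hcb]
    · rw [if_neg (by simp [hcb])]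
      simp [rstep, hcb]

theorem foldl_aStep_eq : ∀ (l : List Char) (st : List Char),
    List.foldl aStep st.reverse l = (List.foldl rstep st l).reverse := by
  intro l
  induction l with
  | nil => intro st; rfl
  | cons c cs ih =>
    intro st
    simp only [List.foldl_cons, aStep_eq_rstep st c]
    exact ih (rstep st c)

theorem rstep_chain {st : List Char} (h : List.IsChain Ne st) (c : Char) :
    List.IsChain Ne (rstep st c) := by
  cases st with
  | nil => exact List.IsChain.singleton c
  | cons b r =>
    by_cases hcb : c = b
    · simpa [rstep, hcb] using h.of_cons
    · have h2 : List.IsChain Ne (c :: b :: r) := List.isChain_cons_cons.mpr ⟨hcb, h⟩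
      simpa [rstep, hcb] using h2

theorem rstep_rstep {st : List Char} (h : List.IsChain Ne st) (a : Char) :
    rstep (rstep st a) a = st := by
  cases st with
  | nil => simp [rstep]
  | cons b r =>
    by_cases hab : a = b
    · subst hab
      cases r with
      | nil => simp [rstep]
      | cons d r' =>
        have had : a ≠ d := (List.isChain_cons_cons.mp h).1
        simp [rstep, had]
    · simp [rstep, hab]

theorem foldl_rstep_chain : ∀ (l st : List Char), List.IsChain Ne st →
    List.IsChain Ne (List.foldl rstep st l) := by
  intro l
  induction l with
  | nil => intro st h; exact h
  | cons c cs ih => intro st h; exact ih _ (rstep_chain h c)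

theorem foldl_rstep_cancel (u v : List Char) (a : Char) :
    List.foldl rstep [] (u ++ a :: a :: v) = List.foldl rstep [] (u ++ v) := by
  rw [List.foldl_append, List.foldl_append, List.foldl_cons, List.foldl_cons]
  rw [rstep_rstep (foldl_rstep_chain u [] List.IsChain.nil) a]

theorem removeFirstPair_split : ∀ (t t' : List Char), removeFirstPair t = some t' →
    ∃ u a v, t = u ++ a :: a :: v ∧ t' = u ++ v
  | [], _, h => by simp [removeFirstPair] at h
  | [_], _, h => by simp [removeFirstPair] at h
  | a :: b :: r, t', h => by
    by_cases hab : a = b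
    · simp only [removeFirstPair, if_pos hab, Option.some.injEq] at h
      exact ⟨[], b, r, by simp [hab], by simp [← h]⟩
    · simp only [removeFirstPair, if_neg hab, Option.map_eq_some_iff] at h
      obtain ⟨w, hw, rfl⟩ := h
      obtain ⟨u, x, v, h1, h2⟩ := removeFirstPair_split (b :: r) w hw
      exact ⟨a :: u, x, v, by simp [h1], by simp [h2]⟩

theorem removeFirstPair_none_chain : ∀ (t : List Char), removeFirstPair t = none →
    List.IsChain Ne t
  | [], _ => List.IsChain.nil
  | [x], _ => List.IsChain.singleton x
  | a :: b :: r, h => by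
    by_cases hab : a = b
    · simp [removeFirstPair, hab] at h
    · simp only [removeFirstPair, if_neg hab, Option.map_eq_none_iff] at h
      exact List.isChain_cons_cons.mpr ⟨hab, removeFirstPair_none_chain (b :: r) h⟩

theorem reduceFix_fix : ∀ (t : List Char), removeFirstPair (reduceFix t) = none := by
  intro t
  induction t using reduceFix.induct with
  | case1 t t' h ih => rw [reduceFix, h]; exact ih
  | case2 t h => rw [reduceFix, h]; exact h

theorem foldl_rstep_reduceFix : ∀ (t : List Char),
    List.foldl rstep [] (reduceFix t) = List.foldl rstep [] t := by
  intro t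
  induction t using reduceFix.induct with
  | case1 t t' h ih =>
    rw [reduceFix, h]
    obtain ⟨u, a, v, h1, h2⟩ := removeFirstPair_split t t' h
    rw [ih, h1, h2, foldl_rstep_cancel]
  | case2 t h => rw [reduceFix, h]

theorem foldl_rstep_of_chain : ∀ (l st : List Char),
    List.IsChain Ne (l.reverse ++ st) → List.foldl rstep st l = l.reverse ++ st := by
  intro l
  induction l with
  | nil => intro st _; simp
  | cons c cs ih =>
    intro st h
    have h' : List.IsChain Ne (cs.reverse ++ (c :: st)) := by
      simpa [List.append_assoc] using h
    have hstep : rstep st c = c :: st := by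
      cases st with
      | nil => rfl
      | cons b r =>
        have hcb : c ≠ b := (List.isChain_cons_cons.mp h'.right_of_append).1
        simp [rstep, hcb]
    rw [List.foldl_cons, hstep, ih (c :: st) h']
    simp

theorem chain_reverse_of_chain {t : List Char} (h : List.IsChain Ne t) :
    List.IsChain Ne t.reverse := by
  rw [List.isChain_reverse]
  exact h.imp fun _ _ hab => Ne.symm hab

theorem stack_eq_reduceFix (l : List Char) :
    List.foldl aStep [] l = reduceFix l := by
  have h0 : List.foldl aStep [] l = (List.foldl rstep [] l).reverse := by
    simpa using foldl_aStep_eq l []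
  have hchain : List.IsChain Ne (reduceFix l) :=
    removeFirstPair_none_chain _ (reduceFix_fix l)
  have h1 : List.foldl rstep [] (reduceFix l) = (reduceFix l).reverse := by
    simpa using foldl_rstep_of_chain (reduceFix l) []
      (by simpa using chain_reverse_of_chain hchain)
  rw [h0, ← foldl_rstep_reduceFix l, h1, List.reverse_reverse]

-- ===== VERDICT (by name: the statement is the Claim_ definition above) =====
theorem solution_spec : Claim_equal_solution := by
  intro s _
  unfold Spec_solution solution solution_alt
  rw [stack_eq_reduceFix]
  by_cases h : reduceFix s.toList = [] <;> simp [h]
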